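-- pv_equiv track=rewrite | github.com/sunray0620/wordle | wordle/main.py | find_next_guess
-- ===== SOURCE A (Python) =====
-- WORD_LEN = 5
--
-- def check(real, guess):
--     result = ['X'] * WORD_LEN
--     real_ct = {}
--     for i in range(WORD_LEN):
--         if real[i] == guess[i]:
--             result[i] = 'G'
--         else:
--             real_ct[real[i]] = real_ct.get(real[i], 0) + 1
--
--     for i in range(WORD_LEN):
--         if result[i] != 'X':
--             continue
--         if real_ct.get(guess[i], 0) > 0:
--             result[i] = 'Y'
--             real_ct[guess[i]] -= 1
--         else:
--             result[i] = 'B'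
--     return ''.join(result)
--
-- def calculate_elimination(guess, candidates):
--     results_ct = {}
--     results = {}
--     max_ct = 0
--     for candidate in candidates:
--         check_result = check(candidate, guess)
--         results_ct[check_result] = results_ct.get(check_result, 0) + 1
--         if not results.get(check_result):
--             results[check_result] = []
--         results[check_result].append(candidate)
--         max_ct = max(max_ct, results_ct[check_result])
--     return max_ct, results
--
-- def find_next_guess(guess_candidates, candidates):
--     min_max = 1000000
--     min_max_candidate = None
--     min_max_nxt = None
--     for guess_candidate in guess_candidates:
--         mx, nxt = calculate_elimination(guess_candidate, candidates)
--         if mx < min_max: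
--             min_max = mx
--             min_max_candidate = guess_candidate
--             min_max_nxt = nxt
--     return min_max_candidate, min_max_nxt
-- ===== SOURCE B (Python) =====
-- WORD_LEN = 5
--
--
-- def check(real, guess):
--     # same feedback helper as the original module
--     result = ['X'] * WORD_LEN
--     real_ct = {}
--     for i in range(WORD_LEN):
--         if real[i] == guess[i]:
--             result[i] = 'G'
--         else:
--             real_ct[real[i]] = real_ct.get(real[i], 0) + 1
--
--     for i in range(WORD_LEN):
--         if result[i] != 'X':
--             continue
--         if real_ct.get(guess[i], 0) > 0:
--             result[i] = 'Y'
--             real_ct[guess[i]] -= 1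
--         else:
--             result[i] = 'B'
--     return ''.join(result)
--
--
-- def _score(guess, candidates):
--     # worst-case bucket size = highest multiplicity among the feedback patterns,
--     # found by per-pattern counting with list.count (no dict, no incremental max)
--     patterns = [check(c, guess) for c in candidates]
--     best = 0
--     for p in patterns:
--         best = max(best, patterns.count(p))
--     return best
--
--
-- def _partition(guess, candidates):
--     # the pattern -> candidates grouping, rebuilt declaratively: distinct patterns
--     # in first-occurrence order, each bucket a filter over the candidate list
--     patterns = [check(c, guess) for c in candidates]
--     seen = list(dict.fromkeys(patterns))
--     return {p: [c for c in candidates if check(c, guess) == p] for p in seen}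
--
--
-- def find_next_guess(guess_candidates, candidates):
--     best, best_score = None, 1000000
--     for g in guess_candidates:
--         s = _score(g, candidates)
--         if s < best_score:
--             best, best_score = g, s
--     if best is None:
--         return None, None
--     return best, _partition(best, candidates)
-- ===== Notes on version B (the rewrite author's own statement) =====
-- stated objective: alternative
-- what changed: A does one dict-heavy pass per guess (a Counter with an incremental max plus an inline pattern->list partition dict); B uses no dicts at all during the search: the score of a guess is the largest multiplicity among its feedback patterns found by list.count, and the partition is rebuilt declaratively only for the winner as first-occurrence-distinct patterns each paired with a filter over the candidates (trades the hash counter for quadratic counting).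
import Mathlib
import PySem

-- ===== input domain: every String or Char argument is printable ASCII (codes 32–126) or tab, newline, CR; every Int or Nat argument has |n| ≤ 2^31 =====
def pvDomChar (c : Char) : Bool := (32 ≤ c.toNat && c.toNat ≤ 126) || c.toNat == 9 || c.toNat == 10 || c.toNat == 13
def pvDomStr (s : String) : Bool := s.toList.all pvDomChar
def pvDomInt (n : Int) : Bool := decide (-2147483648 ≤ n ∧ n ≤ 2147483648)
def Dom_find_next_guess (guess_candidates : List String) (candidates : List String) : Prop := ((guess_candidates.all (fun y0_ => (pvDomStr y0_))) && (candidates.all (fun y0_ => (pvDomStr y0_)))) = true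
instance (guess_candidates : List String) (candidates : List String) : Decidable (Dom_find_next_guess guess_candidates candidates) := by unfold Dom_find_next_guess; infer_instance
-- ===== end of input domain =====

-- B replaces A's per-guess counter-dict + inline partition with dict-free list.count scoring and a declarative winner-only partition; same return value (objective: alternative).


-- ===== PORT A =====
-- check(real, guess), the helper shared verbatim by Source A and Source B.
-- Indexing real[i]/guess[i]/result[i] uses List.getD; this is exact whenever both strings have
-- length ≥ 5 (guaranteed by Pre_ wherever check is reached; Python raises IndexError otherwise).
def pvCheck (real guess : String) : String :=
  let r := real.toList
  let g := guess.toList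
  let st1 := (PySem.List.pyRange 0 5 1).foldl
    (fun (st : List Char × PySem.Dict Char Int) i =>
      let idx := i.toNat
      if r.getD idx ' ' = g.getD idx ' ' then (st.1.set idx 'G', st.2)
      else (st.1, st.2.insert (r.getD idx ' ') (st.2.getD (r.getD idx ' ') 0 + 1)))
    (List.replicate 5 'X', PySem.Dict.empty)
  let st2 := (PySem.List.pyRange 0 5 1).foldl
    (fun (st : List Char × PySem.Dict Char Int) i =>
      let idx := i.toNat
      if st.1.getD idx 'X' ≠ 'X' then st
      else if st.2.getD (g.getD idx ' ') 0 > 0 then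
        (st.1.set idx 'Y', st.2.insert (g.getD idx ' ') (st.2.getD (g.getD idx ' ') 0 - 1))
      else (st.1.set idx 'B', st.2))
    st1
  String.ofList st2.1

-- one iteration of A's loop over candidates: state = (results_ct, results, max_ct)
def pvStepA (guess : String)
    (st : PySem.Dict String Int × PySem.Dict String (List String) × Int) (candidate : String) :
    PySem.Dict String Int × PySem.Dict String (List String) × Int :=
  let cr := pvCheck candidate guess
  let ctr := st.1.insert cr (st.1.getD cr 0 + 1)
  -- 'if not results.get(check_result): results[check_result] = []' (falsy = missing or empty list)
  let res1 := if st.2.1.getD cr [] = [] then st.2.1.insert cr ([] : List String) else st.2.1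
  -- 'results[check_result].append(candidate)'
  let res := res1.modify cr [] (fun l => l ++ [candidate])
  (ctr, res, max st.2.2 (ctr.getD cr 0))

def calculate_elimination (guess : String) (candidates : List String) :
    Int × PySem.Dict String (List String) :=
  let st := candidates.foldl (pvStepA guess) (PySem.Dict.empty, PySem.Dict.empty, 0)
  (st.2.2, st.2.1)

def find_next_guess (guess_candidates : List String) (candidates : List String) :
    Option String × (Option (List (String × List String))) :=
  let st := guess_candidates.foldl
    (fun (st : Int × Option String × Option (PySem.Dict String (List String))) guess_candidate =>
      let r := calculate_elimination guess_candidate candidates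
      if r.1 < st.1 then (r.1, some guess_candidate, some r.2) else st)
    (1000000, none, none)
  (st.2.1, st.2.2.map PySem.Dict.items)

-- ===== PORT B =====
-- _score(guess, candidates): highest multiplicity among the feedback patterns, via list.count
def pv_score (guess : String) (candidates : List String) : Int :=
  let patterns := candidates.map (fun c => pvCheck c guess)
  patterns.foldl (fun best p => max best ((patterns.count p : Nat) : Int)) 0

-- _partition(guess, candidates): dict comprehension over the duplicate-free first-occurrence
-- pattern list 'seen'; its items are exactly these pairs in this order, so the dict IS this list
def pv_partition (guess : String) (candidates : List String) : List (String × List String) :=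
  let patterns := candidates.map (fun c => pvCheck c guess)
  let seen := PySem.List.dedup patterns
  seen.map (fun p => (p, candidates.filter (fun c => pvCheck c guess == p)))

def find_next_guess_alt (guess_candidates : List String) (candidates : List String) :
    Option String × (Option (List (String × List String))) :=
  let st := guess_candidates.foldl
    (fun (st : Option String × Int) g =>
      let s := pv_score g candidates
      if s < st.2 then (some g, s) else st)
    (none, 1000000)
  match st.1 with
  | none => (none, none)
  | some best => (some best, some (pv_partition best candidates))

-- ===== PRECONDITION & SPEC =====
-- Pre_ excludes exactly the inputs where Python A raises IndexError: both lists nonempty while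
-- some word is shorter than WORD_LEN = 5 characters.
def Pre_find_next_guess (guess_candidates : List String) (candidates : List String) : Prop :=
  guess_candidates = [] ∨ candidates = [] ∨
    ((∀ s ∈ guess_candidates, 5 ≤ s.length) ∧ (∀ s ∈ candidates, 5 ≤ s.length))
instance (guess_candidates : List String) (candidates : List String) : Decidable (Pre_find_next_guess guess_candidates candidates) := by unfold Pre_find_next_guess; infer_instance

def pvWitness_find_next_guess : List String × List String :=
  (["crane", "slate"], ["crane", "slate", "trace"])

def Spec_find_next_guess (guess_candidates : List String) (candidates : List String) (out : Option String × (Option (List (String × List String)))) : Prop := out = find_next_guess_alt guess_candidates candidates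
instance (guess_candidates : List String) (candidates : List String) (out : Option String × (Option (List (String × List String)))) : Decidable (Spec_find_next_guess guess_candidates candidates out) := by unfold Spec_find_next_guess; infer_instance

-- ===== CLAIM (what is proved, stated in full; the proofs are below) =====
def Claim_equal_find_next_guess : Prop := ∀ (guess_candidates : List String) (candidates : List String), Dom_find_next_guess guess_candidates candidates → Pre_find_next_guess guess_candidates candidates → Spec_find_next_guess guess_candidates candidates (find_next_guess guess_candidates candidates)

-- ===== LEMMAS AND PROOFS =====

-- max of a dict's Int values with default 0 (= A's mx at the end of its candidate loop)
def pvM (d : PySem.Dict String Int) : Int := d.values.foldl max 0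

theorem pv_foldl_max_shift (l : List Int) : ∀ (a b : Int),
    l.foldl max (max a b) = max (l.foldl max a) b := by
  induction l with
  | nil => intro a b; rfl
  | cons x t ih =>
    intro a b
    simp only [List.foldl_cons]
    rw [max_right_comm a b x, ih]

theorem pv_modify_eq_insert (d : PySem.Dict String (List String)) (k : String)
    (f : List String → List String) :
    d.modify k [] f = d.insert k (f (d.getD k [])) := rfl

-- bumping one count raises the value-max accordingly (keys duplicate-free)
theorem pv_bump (d : PySem.Dict String Int) (cr : String) (hnd : d.keys.Nodup) :
    pvM (d.insert cr (d.getD cr 0 + 1)) = max (pvM d) (d.getD cr 0 + 1) := by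
  by_cases h : d.contains cr = true
  · have hk : cr ∈ d.keys := (PySem.Dict.contains_iff_mem_keys d cr).mp h
    obtain ⟨l₁, l₂, hsplit⟩ := List.append_of_mem hk
    have hnd2 := hnd
    rw [hsplit, List.nodup_append] at hnd2
    obtain ⟨-, hndc, hdisj⟩ := hnd2
    have hcr1 : cr ∉ l₁ := fun hm => hdisj cr hm cr (by simp) rfl
    have hcr2 : cr ∉ l₂ := (List.nodup_cons.mp hndc).1
    have hndi : (d.insert cr (d.getD cr 0 + 1)).keys.Nodup :=
      PySem.Dict.nodup_keys_insert d cr _ hnd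
    have hm1 : ∀ k ∈ l₁, (d.insert cr (d.getD cr 0 + 1)).getD k 0 = d.getD k 0 := by
      intro k hkm
      rw [PySem.Dict.getD_insert]
      exact if_neg (by rintro rfl; exact hcr1 hkm)
    have hm2 : ∀ k ∈ l₂, (d.insert cr (d.getD cr 0 + 1)).getD k 0 = d.getD k 0 := by
      intro k hkm
      rw [PySem.Dict.getD_insert]
      exact if_neg (by rintro rfl; exact hcr2 hkm)
    unfold pvM
    rw [PySem.Dict.values_eq_map_keys d hnd 0,
        PySem.Dict.values_eq_map_keys _ hndi 0,
        PySem.Dict.keys_insert_of_contains d _ h, hsplit]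
    simp only [List.map_append, List.map_cons, List.foldl_append, List.foldl_cons]
    rw [List.map_congr_left hm1, List.map_congr_left hm2,
        PySem.Dict.getD_insert_self, pv_foldl_max_shift, pv_foldl_max_shift,
        max_assoc]
    congr 1
    exact (max_eq_right (by omega)).symm
  · have hne : d.contains cr = false := by simpa using h
    unfold pvM
    rw [PySem.Dict.values_eq_map_keys d hnd 0,
        PySem.Dict.values_eq_map_keys _ (PySem.Dict.nodup_keys_insert d cr _ hnd) 0,
        PySem.Dict.keys_insert_of_not_contains d _ hne,
        PySem.Dict.getD_of_not_contains d 0 hne]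
    simp only [List.map_append, List.map_cons, List.map_nil, List.foldl_append,
      List.foldl_cons, List.foldl_nil]
    have hm1 : ∀ k ∈ d.keys, (d.insert cr (0 + 1)).getD k 0 = d.getD k 0 := by
      intro k hkm
      rw [PySem.Dict.getD_insert]
      refine if_neg (fun he => ?_)
      subst he
      exact absurd ((PySem.Dict.contains_iff_mem_keys d k).mpr hkm) (by simp [hne])
    rw [List.map_congr_left hm1, PySem.Dict.getD_insert_self]

-- invariant of A's results dict: no stored bucket is empty
def pvInv (res : PySem.Dict String (List String)) : Prop := ∀ l ∈ res.values, l ≠ []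

-- the two inner loops of A's calculate_elimination, separated (for the fold split)
def pvStepC (guess : String) (d : PySem.Dict String Int) (candidate : String) :
    PySem.Dict String Int :=
  let pattern := pvCheck candidate guess
  d.insert pattern (d.getD pattern 0 + 1)

def pvStepP (guess : String) (d : PySem.Dict String (List String)) (candidate : String) :
    PySem.Dict String (List String) :=
  let pattern := pvCheck candidate guess
  d.modify pattern [] (fun l => l ++ [candidate])

theorem pv_stepP_inv (guess : String) (res : PySem.Dict String (List String))
    (hinv : pvInv res) (c : String) : pvInv (pvStepP guess res c) := by
  intro l hl
  simp only [pvStepP, pv_modify_eq_insert] at hl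
  rcases PySem.Dict.mem_values_insert _ _ _ _ hl with h | h
  · subst h; simp
  · exact hinv l h

theorem pv_stepA_eq (guess : String) (ct : PySem.Dict String Int)
    (res : PySem.Dict String (List String)) (mx : Int) (c : String)
    (hnd : ct.keys.Nodup) (hmx : mx = pvM ct) (hinv : pvInv res) :
    pvStepA guess (ct, res, mx) c =
      (pvStepC guess ct c, pvStepP guess res c, pvM (pvStepC guess ct c)) := by
  simp only [pvStepA, pvStepC, pvStepP]
  refine Prod.ext rfl (Prod.ext ?_ ?_)
  · -- results component
    show (if res.getD (pvCheck c guess) [] = [] then res.insert (pvCheck c guess) [] else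
          res).modify (pvCheck c guess) [] (fun l => l ++ [c]) =
         res.modify (pvCheck c guess) [] (fun l => l ++ [c])
    rcases hg : res.get? (pvCheck c guess) with _ | l
    · rw [if_pos (by rw [PySem.Dict.getD_eq_get?_getD, hg]; rfl)]
      rw [pv_modify_eq_insert, pv_modify_eq_insert, PySem.Dict.getD_insert_self,
          PySem.Dict.insert_insert_self, PySem.Dict.getD_eq_get?_getD, hg]
      rfl
    · have hlv : l ∈ res.values := by
        have := PySem.Dict.mem_items_of_get?_eq_some res hg
        exact List.mem_map_of_mem this
      rw [if_neg (by rw [PySem.Dict.getD_eq_get?_getD, hg]; exact hinv l hlv)]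
  · -- max component
    show max mx ((ct.insert (pvCheck c guess) (ct.getD (pvCheck c guess) 0 + 1)).getD
          (pvCheck c guess) 0) =
         pvM (ct.insert (pvCheck c guess) (ct.getD (pvCheck c guess) 0 + 1))
    rw [PySem.Dict.getD_insert_self, hmx, pv_bump ct _ hnd]

theorem pv_fold_split (guess : String) : ∀ (cs : List String)
    (ct : PySem.Dict String Int) (res : PySem.Dict String (List String)) (mx : Int),
    ct.keys.Nodup → mx = pvM ct → pvInv res →
    cs.foldl (pvStepA guess) (ct, res, mx) =
      (cs.foldl (pvStepC guess) ct, cs.foldl (pvStepP guess) res,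
       pvM (cs.foldl (pvStepC guess) ct)) := by
  intro cs
  induction cs with
  | nil =>
    intro ct res mx _ hmx _
    simp [List.foldl_nil, hmx]
  | cons c cs ih =>
    intro ct res mx hnd hmx hinv
    simp only [List.foldl_cons]
    rw [pv_stepA_eq guess ct res mx c hnd hmx hinv]
    exact ih _ _ _ (PySem.Dict.nodup_keys_insert ct _ _ hnd) rfl
      (pv_stepP_inv guess res hinv c)

-- bounds for foldl max
theorem pv_le_foldl_init (l : List Int) : ∀ a : Int, a ≤ l.foldl max a := by
  induction l with
  | nil => intro a; exact le_refl a
  | cons x t ih => intro a; exact le_trans (le_max_left a x) (ih (max a x))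

theorem pv_le_foldl_mem (l : List Int) : ∀ (a x : Int), x ∈ l → x ≤ l.foldl max a := by
  induction l with
  | nil => intro a x hx; exact absurd hx (List.not_mem_nil)
  | cons y t ih =>
    intro a x hx
    rcases List.mem_cons.mp hx with h | h
    · subst h; exact le_trans (le_max_right a x) (pv_le_foldl_init t _)
    · exact ih _ x h

theorem pv_foldl_le (l : List Int) : ∀ (a b : Int), a ≤ b → (∀ x ∈ l, x ≤ b) →
    l.foldl max a ≤ b := by
  induction l with
  | nil => intro a b hab _; exact hab
  | cons y t ih =>
    intro a b hab hall
    exact ih _ b (max_le hab (hall y (by simp))) (fun x hx => hall x (by simp [hx]))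

-- foldl max 0 over mapped values only depends on which elements occur
theorem pv_foldl_max_memcongr {α : Type} (f : α → Int) (l₁ l₂ : List α)
    (h : ∀ x, x ∈ l₁ ↔ x ∈ l₂) :
    (l₁.map f).foldl max 0 = (l₂.map f).foldl max 0 := by
  apply le_antisymm
  · refine pv_foldl_le _ 0 _ (pv_le_foldl_init _ 0) ?_
    intro x hx
    obtain ⟨a, ha, rfl⟩ := List.mem_map.mp hx
    exact pv_le_foldl_mem _ 0 _ (List.mem_map_of_mem ((h a).mp ha))
  · refine pv_foldl_le _ 0 _ (pv_le_foldl_init _ 0) ?_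
    intro x hx
    obtain ⟨a, ha, rfl⟩ := List.mem_map.mp hx
    exact pv_le_foldl_mem _ 0 _ (List.mem_map_of_mem ((h a).mpr ha))

-- A's counter loop yields B's list.count-based score
theorem pv_score_eq (guess : String) (cands : List String) :
    pvM (cands.foldl (pvStepC guess) PySem.Dict.empty) = pv_score guess cands := by
  have h1 : cands.foldl (pvStepC guess) PySem.Dict.empty =
      PySem.Dict.counter (cands.map (fun c => pvCheck c guess)) := by
    rw [← PySem.Dict.foldl_insert_getD_add_one_eq_counter, List.foldl_map]
    rfl
  rw [h1]
  have hnd := PySem.Dict.nodup_keys_counter (cands.map (fun c => pvCheck c guess))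
  unfold pvM
  rw [PySem.Dict.values_eq_map_keys _ hnd 0, PySem.Dict.keys_counter]
  have hmap : ∀ k ∈ PySem.Set.ofList (cands.map (fun c => pvCheck c guess)),
      (PySem.Dict.counter (cands.map (fun c => pvCheck c guess))).getD k 0 =
      (((cands.map (fun c => pvCheck c guess)).count k : Nat) : Int) := by
    intro k _
    exact PySem.Dict.getD_counter _ k
  rw [List.map_congr_left hmap]
  have h2 : pv_score guess cands =
      ((cands.map (fun c => pvCheck c guess)).map
        (fun k => (((cands.map (fun c => pvCheck c guess)).count k : Nat) : Int))).foldl max 0 := by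
    unfold pv_score
    rw [List.foldl_map, List.foldl_map, List.foldl_map]
  rw [h2]
  exact pv_foldl_max_memcongr _ _ _ (fun x => PySem.Set.mem_ofList _ x)

-- A's partition loop yields B's declarative partition (as items)
theorem pv_items_eq (guess : String) (cands : List String) :
    (cands.foldl (pvStepP guess) PySem.Dict.empty).items = pv_partition guess cands := by
  have hkeys : (cands.foldl (pvStepP guess) PySem.Dict.empty).keys =
      PySem.Set.ofList (cands.map (fun c => pvCheck c guess)) := by
    show (cands.foldl (fun d c => d.modify (pvCheck c guess) [] (fun l => l ++ [c]))
        PySem.Dict.empty).keys = _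
    rw [PySem.Dict.keys_foldl_modify_key, PySem.Dict.keys_empty, PySem.Set.update_nil_left]
  have hnd : (cands.foldl (pvStepP guess) PySem.Dict.empty).keys.Nodup :=
    PySem.Dict.nodup_keys_foldl_modify_key cands (fun c => pvCheck c guess) []
      (fun _ c => fun l => l ++ [c]) PySem.Dict.empty (by simp [PySem.Dict.keys_empty])
  have hgetD : ∀ k, (cands.foldl (pvStepP guess) PySem.Dict.empty).getD k [] =
      cands.filter (fun c => pvCheck c guess == k) := by
    intro k
    have hfold : cands.foldl (pvStepP guess) PySem.Dict.empty =
        (cands.map (fun c => (pvCheck c guess, c))).foldl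
          (fun d p => d.modify p.1 [] (fun l => l ++ [p.2])) PySem.Dict.empty := by
      rw [List.foldl_map]
      rfl
    rw [hfold, PySem.Dict.getD_foldl_modify_append, PySem.Dict.getD_empty, List.nil_append,
      List.filter_map]
    simp [Function.comp_def]
  rw [PySem.Dict.items_eq_map_keys _ hnd ([] : List String), hkeys]
  unfold pv_partition
  simp only [PySem.List.dedup_eq_ofList]
  refine List.map_congr_left ?_
  intro k hk
  rw [← hkeys] at hk
  rw [hgetD k]

-- the two programs' candidate-pass results, packaged
theorem pv_calc_eq (guess : String) (cands : List String) :
    calculate_elimination guess cands =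
      (pv_score guess cands, cands.foldl (pvStepP guess) PySem.Dict.empty) := by
  have h1 : calculate_elimination guess cands =
      ((cands.foldl (pvStepA guess) (PySem.Dict.empty, PySem.Dict.empty, 0)).2.2,
       (cands.foldl (pvStepA guess) (PySem.Dict.empty, PySem.Dict.empty, 0)).2.1) := rfl
  have hinv0 : pvInv (PySem.Dict.empty : PySem.Dict String (List String)) := by
    intro l hl
    exact absurd hl (List.not_mem_nil)
  rw [h1, pv_fold_split guess cands _ _ 0 PySem.Dict.nodup_keys_empty (by rfl) hinv0,
    pv_score_eq]

-- the two loop bodies of the search over guesses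
def pvStepG (cands : List String)
    (st : Int × Option String × Option (PySem.Dict String (List String))) (g : String) :
    Int × Option String × Option (PySem.Dict String (List String)) :=
  let r := calculate_elimination g cands
  if r.1 < st.1 then (r.1, some g, some r.2) else st

def pvStepB (cands : List String) (st : Option String × Int) (g : String) :
    Option String × Int :=
  let s := pv_score g cands
  if s < st.2 then (some g, s) else st

theorem pv_find_fold (cands : List String) : ∀ (gcs : List String) (m : Int) (c : Option String),
    gcs.foldl (pvStepG cands) (m, c, c.map (fun g => cands.foldl (pvStepP g) PySem.Dict.empty)) =
      ((gcs.foldl (pvStepB cands) (c, m)).2, (gcs.foldl (pvStepB cands) (c, m)).1,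
       (gcs.foldl (pvStepB cands) (c, m)).1.map (fun g => cands.foldl (pvStepP g) PySem.Dict.empty)) := by
  intro gcs
  induction gcs with
  | nil => intro m c; rfl
  | cons g gcs ih =>
    intro m c
    simp only [List.foldl_cons]
    have hstep : pvStepG cands (m, c, c.map (fun g => cands.foldl (pvStepP g) PySem.Dict.empty)) g =
        ((pvStepB cands (c, m) g).2, (pvStepB cands (c, m) g).1,
         (pvStepB cands (c, m) g).1.map (fun g => cands.foldl (pvStepP g) PySem.Dict.empty)) := by
      simp only [pvStepG, pvStepB, pv_calc_eq]
      by_cases hc : pv_score g cands < m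
      · simp [hc]
      · simp [hc]
    rw [hstep]
    exact ih (pvStepB cands (c, m) g).2 (pvStepB cands (c, m) g).1

-- ===== VERDICT (by name: the statement is the Claim_ definition above) =====
theorem find_next_guess_spec : Claim_equal_find_next_guess := by
  intro gcs cands _ _
  unfold Spec_find_next_guess
  have hA : find_next_guess gcs cands =
      ((gcs.foldl (pvStepG cands) (1000000, none, none)).2.1,
       (gcs.foldl (pvStepG cands) (1000000, none, none)).2.2.map PySem.Dict.items) := rfl
  have hB : find_next_guess_alt gcs cands =
      (match (gcs.foldl (pvStepB cands) (none, 1000000)).1 with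
       | none => (none, none)
       | some b => (some b, some (pv_partition b cands))) := rfl
  rw [hA, hB]
  have h0 : (none : Option (PySem.Dict String (List String))) =
      (none : Option String).map (fun g => cands.foldl (pvStepP g) PySem.Dict.empty) := rfl
  rw [h0, pv_find_fold cands gcs 1000000 none]
  rcases (gcs.foldl (pvStepB cands) (none, 1000000)).1 with _ | b
  · rfl
  · simp only [Option.map_some]
    rw [pv_items_eq]
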